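-- pv_equiv track=rewrite | github.com/anthonykish/EECE590X | 06_homework/generate_random_fsms.py | make_input_patterns
-- ===== SOURCE A (Python) =====
-- from itertools import product
--
-- def make_input_patterns(input_names: list[str]) -> list[str]:
--     patterns = []
--     for bits in product([0, 1], repeat=len(input_names)):
--         parts = []
--         for name, bit in zip(input_names, bits):
--             parts.append(name if bit == 1 else f"{name}'")
--         patterns.append(" ".join(parts))
--     return patterns
-- ===== SOURCE B (Python) =====
-- def make_input_patterns(input_names: list[str]) -> list[str]:
--     if not input_names:
--         return ['']
--     name = input_names[0]
--     tail = input_names[1:]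
--     rest = make_input_patterns(tail)
--     if not tail:
--         return [name + "'", name]
--     return [form + ' ' + r for form in (name + "'", name) for r in rest]
-- ===== Notes on version B (the rewrite author's own statement) =====
-- stated objective: alternative
-- what changed: Replaces the itertools.product bit-tuple generator plus inner zip/join loop by a single structural recursion on the name list that combines each name's two literal forms with the recursively built patterns of the tail.
import Mathlib
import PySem

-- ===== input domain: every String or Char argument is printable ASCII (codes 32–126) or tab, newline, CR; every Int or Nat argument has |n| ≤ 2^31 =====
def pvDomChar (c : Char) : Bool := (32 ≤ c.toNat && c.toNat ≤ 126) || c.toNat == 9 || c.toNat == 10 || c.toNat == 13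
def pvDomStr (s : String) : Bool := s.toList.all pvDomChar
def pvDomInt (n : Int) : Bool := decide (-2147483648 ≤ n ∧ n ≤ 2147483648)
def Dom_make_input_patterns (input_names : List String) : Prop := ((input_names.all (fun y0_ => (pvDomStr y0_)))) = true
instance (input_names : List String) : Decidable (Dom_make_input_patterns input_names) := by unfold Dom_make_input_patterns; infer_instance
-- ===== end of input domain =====

-- B replaces the itertools.product generator plus join loop by a structural recursion
-- on the name list (objective: alternative decomposition; same 2^n cost).

-- ===== PORT A =====
-- itertools.product([0,1], repeat=n), built the way product builds it:
-- one extension step per factor, each existing tuple extended by 0 then 1 at the end.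
def pvProduct01 : Nat → List (List Int)
  | 0 => [[]]
  | n + 1 => (pvProduct01 n).flatMap (fun x => [x ++ [0], x ++ [1]])

-- the inner parts loop: name if bit == 1 else name + "'"
def pvParts (input_names : List String) (bits : List Int) : List String :=
  (input_names.zip bits).map (fun nb => if nb.2 = 1 then nb.1 else nb.1 ++ "'")

-- " ".join(parts)
def pvJoinSpace : List String → String
  | [] => ""
  | [p] => p
  | p :: q :: ps => p ++ " " ++ pvJoinSpace (q :: ps)

def make_input_patterns (input_names : List String) : List String :=
  (pvProduct01 input_names.length).map (fun bits => pvJoinSpace (pvParts input_names bits))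

-- ===== PORT B =====
def make_input_patterns_alt : List String → List String
  | [] => [""]
  | name :: tail =>
    let rest := make_input_patterns_alt tail
    match tail with
    | [] => [name ++ "'", name]
    | _ :: _ => [name ++ "'", name].flatMap (fun form => rest.map (fun r => form ++ " " ++ r))

-- ===== PRECONDITION & SPEC =====
def Spec_make_input_patterns (input_names : List String) (out : List String) : Prop := out = make_input_patterns_alt input_names
instance (input_names : List String) (out : List String) : Decidable (Spec_make_input_patterns input_names out) := by unfold Spec_make_input_patterns; infer_instance

-- ===== CLAIM (what is proved, stated in full; the proofs are below) =====
def Claim_equal_make_input_patterns : Prop := ∀ (input_names : List String), Dom_make_input_patterns input_names → Spec_make_input_patterns input_names (make_input_patterns input_names)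

-- ===== LEMMAS AND PROOFS =====

-- the append-at-the-end product, read off from the front: first bit 0 block, then first bit 1 block
theorem pvProduct01_cons (n : Nat) :
    pvProduct01 (n + 1)
      = (pvProduct01 n).map (fun t => (0 : Int) :: t) ++ (pvProduct01 n).map (fun t => (1 : Int) :: t) := by
  induction n with
  | zero => rfl
  | succ n ih =>
    calc pvProduct01 (n + 2)
        = (pvProduct01 (n + 1)).flatMap (fun x => [x ++ [0], x ++ [1]]) := rfl
      _ = ((pvProduct01 n).map (fun t => (0 : Int) :: t)
            ++ (pvProduct01 n).map (fun t => (1 : Int) :: t)).flatMap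
              (fun x => [x ++ [0], x ++ [1]]) := by rw [ih]
      _ = _ := by
            simp [List.flatMap_append, List.flatMap_map, List.map_flatMap, pvProduct01]

theorem pvProduct01_length (n : Nat) : ∀ bits ∈ pvProduct01 n, bits.length = n := by
  induction n with
  | zero => intro bits h; simp [pvProduct01] at h; simp [h]
  | succ n ih =>
    intro bits h
    rw [pvProduct01_cons] at h
    rcases List.mem_append.mp h with h | h <;>
      · rcases List.mem_map.mp h with ⟨t, ht, rfl⟩
        simp [ih t ht]

theorem pvAlt_cons (name t : String) (ts : List String) :
    make_input_patterns_alt (name :: t :: ts)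
      = [name ++ "'", name].flatMap
          (fun form => (make_input_patterns_alt (t :: ts)).map (fun r => form ++ " " ++ r)) := rfl

theorem make_input_patterns_eq_alt (input_names : List String) :
    make_input_patterns input_names = make_input_patterns_alt input_names := by
  induction input_names with
  | nil => rfl
  | cons name tail ih =>
    cases tail with
    | nil => simp [make_input_patterns, make_input_patterns_alt, pvProduct01, pvParts, pvJoinSpace]
    | cons t ts =>
      have key : ∀ (b : Int), ((pvProduct01 (t :: ts).length).map
            (fun bits => pvJoinSpace (pvParts (name :: t :: ts) (b :: bits))))
          = ((pvProduct01 (t :: ts).length).map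
            (fun bits => (if b = 1 then name else name ++ "'") ++ " "
              ++ pvJoinSpace (pvParts (t :: ts) bits))) := by
        intro b
        apply List.map_congr_left
        intro bits hmem
        have hlen := pvProduct01_length _ bits hmem
        cases bits with
        | nil => simp at hlen
        | cons c cs => simp [pvParts, pvJoinSpace]
      have hrest : ((pvProduct01 (t :: ts).length).map
            (fun bits => pvJoinSpace (pvParts (t :: ts) bits)))
          = make_input_patterns_alt (t :: ts) := by
        simpa [make_input_patterns] using ih
      calc make_input_patterns (name :: t :: ts)
          = (pvProduct01 ((t :: ts).length + 1)).map
              (fun bits => pvJoinSpace (pvParts (name :: t :: ts) bits)) := rfl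
        _ = ((pvProduct01 (t :: ts).length).map
              (fun bits => pvJoinSpace (pvParts (name :: t :: ts) ((0 : Int) :: bits))))
            ++ ((pvProduct01 (t :: ts).length).map
              (fun bits => pvJoinSpace (pvParts (name :: t :: ts) ((1 : Int) :: bits)))) := by
              rw [pvProduct01_cons, List.map_append, List.map_map, List.map_map]; rfl
        _ = ((pvProduct01 (t :: ts).length).map
              (fun bits => (name ++ "'") ++ " " ++ pvJoinSpace (pvParts (t :: ts) bits)))
            ++ ((pvProduct01 (t :: ts).length).map
              (fun bits => name ++ " " ++ pvJoinSpace (pvParts (t :: ts) bits))) := by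
              rw [key 0, key 1]; norm_num
        _ = make_input_patterns_alt (name :: t :: ts) := by
              rw [pvAlt_cons, List.flatMap_cons, List.flatMap_cons, List.flatMap_nil,
                List.append_nil, ← hrest, List.map_map, List.map_map]
              rfl

-- ===== VERDICT (by name: the statement is the Claim_ definition above) =====
theorem make_input_patterns_spec : Claim_equal_make_input_patterns := by
  intro input_names _
  exact make_input_patterns_eq_alt input_names
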